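-- pv_equiv track=rewrite | github.com/IrrevocableCascade/Python_Learnings | Project Euler/Smallest Multiple.py | is_evenly_divisible
-- ===== SOURCE A (Python) =====
-- def is_evenly_divisible(number):
-- 	i = 1
-- 	while i <= 20:
-- 		if number % i == 0:
-- 			if i == 20:
-- 				return True
-- 			i += 1
-- 			continue
-- 		else:
-- 			break
-- ===== SOURCE B (Python) =====
-- def is_evenly_divisible(number):
-- 	# closed form: lcm(1..20) = 232792560; implicit None on failure, like A
-- 	if number % 232792560 == 0:
-- 		return True
-- ===== Notes on version B (the rewrite author's own statement) =====
-- stated objective: simpler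
-- what changed: Replaces the trial loop over divisors 1..20 with a single modulo test against lcm(1..20), keeping the implicit None on failure.
import Mathlib
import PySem

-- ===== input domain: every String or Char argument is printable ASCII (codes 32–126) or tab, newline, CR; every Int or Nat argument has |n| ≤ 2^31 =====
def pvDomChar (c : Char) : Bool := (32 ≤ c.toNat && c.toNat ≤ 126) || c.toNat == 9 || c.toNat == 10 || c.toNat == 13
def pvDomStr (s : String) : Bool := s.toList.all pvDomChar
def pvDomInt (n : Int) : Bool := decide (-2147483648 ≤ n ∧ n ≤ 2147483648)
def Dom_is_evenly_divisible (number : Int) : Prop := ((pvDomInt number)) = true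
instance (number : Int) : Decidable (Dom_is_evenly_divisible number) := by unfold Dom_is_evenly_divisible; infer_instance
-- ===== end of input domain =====

-- B replaces the divisor loop 1..20 by one modulo test against lcm(1..20); objective: simpler.
-- ===== PORT A =====
-- while-loop of A: fuel counts remaining iterations (i runs 1..20; 20 suffices)
def pvLoopA (number : Int) (i : Int) (fuel : Nat) : Option Bool :=
  if fuel = 0 then none
  else if i ≤ 20 then
    if PySem.Int.mod number i == 0 then
      if i == 20 then some true
      else pvLoopA number (i+1) (fuel - 1)
    else none
  else none
termination_by fuel
decreasing_by omega

def is_evenly_divisible (number : Int) : Option Bool := pvLoopA number 1 20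

-- ===== PORT B =====
def is_evenly_divisible_alt (number : Int) : Option Bool :=
  if PySem.Int.mod number 232792560 == 0 then some true else none

-- ===== PRECONDITION & SPEC =====
def Spec_is_evenly_divisible (number : Int) (out : Option Bool) : Prop := out = is_evenly_divisible_alt number
instance (number : Int) (out : Option Bool) : Decidable (Spec_is_evenly_divisible number out) := by unfold Spec_is_evenly_divisible; infer_instance

-- ===== CLAIM (what is proved, stated in full; the proofs are below) =====
def Claim_equal_is_evenly_divisible : Prop := ∀ (number : Int), Dom_is_evenly_divisible number → Spec_is_evenly_divisible number (is_evenly_divisible number)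

-- ===== LEMMAS AND PROOFS =====

-- A's loop returns some true when every divisor in [i, 20] divides number
theorem loopA_some (n : Int) : ∀ (fuel : Nat) (i : Int), 1 ≤ i → i ≤ 20 → i + fuel = 21 →
    (∀ j : Int, i ≤ j → j ≤ 20 → j ∣ n) → pvLoopA n i fuel = some true := by
  intro fuel
  induction fuel with
  | zero => intro i h1 h2 h3; omega
  | succ f ih =>
    intro i h1 h2 h3 hall
    rw [pvLoopA]
    have hd : i ∣ n := hall i le_rfl h2
    have hc : (PySem.Int.mod n i == 0) = true := by
      simp [PySem.Int.mod_eq_zero_iff_dvd, hd]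
    simp only [Nat.succ_ne_zero, if_false, if_pos h2, hc, if_true, Nat.add_sub_cancel]
    by_cases h20 : i = 20
    · simp [h20]
    · have hne : (i == 20) = false := by simp [h20]
      rw [hne]
      simp only [Bool.false_eq_true, if_false]
      exact ih (i+1) (by omega) (by omega) (by omega)
        (fun j hj hjle => hall j (by omega) hjle)

-- A's loop returns none when some divisor in [i, 20] fails
theorem loopA_none (n : Int) : ∀ (fuel : Nat) (i : Int), 1 ≤ i → i ≤ 20 → i + fuel = 21 →
    (∃ j : Int, i ≤ j ∧ j ≤ 20 ∧ ¬ j ∣ n) → pvLoopA n i fuel = none := by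
  intro fuel
  induction fuel with
  | zero => intro i h1 h2 h3; omega
  | succ f ih =>
    intro i h1 h2 h3 hex
    rw [pvLoopA]
    by_cases hd : i ∣ n
    · have hc : (PySem.Int.mod n i == 0) = true := by
        simp [PySem.Int.mod_eq_zero_iff_dvd, hd]
      simp only [Nat.succ_ne_zero, if_false, if_pos h2, hc, if_true, Nat.add_sub_cancel]
      obtain ⟨j, hj1, hj2, hj3⟩ := hex
      have hji : j ≠ i := fun he => hj3 (he ▸ hd)
      by_cases h20 : i = 20
      · exfalso; omega
      · have hne : (i == 20) = false := by simp [h20]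
        rw [hne]
        simp only [Bool.false_eq_true, if_false]
        exact ih (i+1) (by omega) (by omega) (by omega) ⟨j, by omega, hj2, hj3⟩
    · have hc : (PySem.Int.mod n i == 0) = false := by
        simp [PySem.Int.mod_eq_zero_iff_dvd, hd]
      simp only [Nat.succ_ne_zero, if_false, if_pos h2, hc, Bool.false_eq_true]

-- if every integer in [1, 20] divides n then lcm(1..20) = 232792560 divides n
theorem all_dvd_lcm (n : Int) (hall : ∀ j : Int, 1 ≤ j → j ≤ 20 → j ∣ n) : (232792560:Int) ∣ n := by
  have h16 := hall 16 (by norm_num) (by norm_num)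
  have h9 := hall 9 (by norm_num) (by norm_num)
  have h5 := hall 5 (by norm_num) (by norm_num)
  have h7 := hall 7 (by norm_num) (by norm_num)
  have h11 := hall 11 (by norm_num) (by norm_num)
  have h13 := hall 13 (by norm_num) (by norm_num)
  have h17 := hall 17 (by norm_num) (by norm_num)
  have h19 := hall 19 (by norm_num) (by norm_num)
  have c1 : IsCoprime (16:Int) 9 := by rw [Int.isCoprime_iff_gcd_eq_one]; norm_num
  have d1 := c1.mul_dvd h16 h9
  have c2 : IsCoprime (16*9:Int) 5 := by rw [Int.isCoprime_iff_gcd_eq_one]; norm_num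
  have d2 := c2.mul_dvd d1 h5
  have c3 : IsCoprime (16*9*5:Int) 7 := by rw [Int.isCoprime_iff_gcd_eq_one]; norm_num
  have d3 := c3.mul_dvd d2 h7
  have c4 : IsCoprime (16*9*5*7:Int) 11 := by rw [Int.isCoprime_iff_gcd_eq_one]; norm_num
  have d4 := c4.mul_dvd d3 h11
  have c5 : IsCoprime (16*9*5*7*11:Int) 13 := by rw [Int.isCoprime_iff_gcd_eq_one]; norm_num
  have d5 := c5.mul_dvd d4 h13
  have c6 : IsCoprime (16*9*5*7*11*13:Int) 17 := by rw [Int.isCoprime_iff_gcd_eq_one]; norm_num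
  have d6 := c6.mul_dvd d5 h17
  have c7 : IsCoprime (16*9*5*7*11*13*17:Int) 19 := by rw [Int.isCoprime_iff_gcd_eq_one]; norm_num
  have d7 := c7.mul_dvd d6 h19
  have he : (16*9*5*7*11*13*17*19:Int) = 232792560 := by norm_num
  rwa [he] at d7

-- each integer in [1, 20] divides lcm(1..20) = 232792560
theorem mem_dvd_lcm (j : Int) (h1 : 1 ≤ j) (h2 : j ≤ 20) : j ∣ 232792560 := by
  interval_cases j <;> decide

-- ===== VERDICT (by name: the statement is the Claim_ definition above) =====
theorem is_evenly_divisible_spec : Claim_equal_is_evenly_divisible := by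
  intro n _
  show is_evenly_divisible n = is_evenly_divisible_alt n
  unfold is_evenly_divisible is_evenly_divisible_alt
  by_cases hall : ∀ j : Int, 1 ≤ j → j ≤ 20 → j ∣ n
  · have hL : (232792560 : Int) ∣ n := all_dvd_lcm n hall
    have hc : (PySem.Int.mod n 232792560 == 0) = true := by
      simp [hL]
    rw [loopA_some n 20 1 (by omega) (by omega) (by omega) hall, hc]
    rfl
  · push Not at hall
    obtain ⟨j, hj1, hj2, hj3⟩ := hall
    have hL : ¬ (232792560 : Int) ∣ n :=
      fun h => hj3 ((mem_dvd_lcm j hj1 hj2).trans h)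
    have hc : (PySem.Int.mod n 232792560 == 0) = false := by
      simp [hL]
    rw [loopA_none n 20 1 (by omega) (by omega) (by omega) ⟨j, hj1, hj2, hj3⟩, hc]
    rfl
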